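-- pv_equiv track=rewrite | github.com/HexRoy/Python-Coding-Challenge-Problems | DCP 43 Non Overlapping Jobs.py | longest_job
-- ===== SOURCE A (Python) =====
-- def longest_job(n):
--     """
--     longest_job: Find the longest sequence of non overlapping jobs
--     :param n: (List(Tuples)) - Contains the start and end time of jobs
--     :return: (List(Tuples)) - Contains the longest job sequence
--     """
--     job_list = []
--
--     for i in range(len(n)):
--         temp_job_list = [n[i]]
--         end_time = n[i][1]
--         for j in range(i, len(n)):
--             if n[j][0] >= end_time:
--                 temp_job_list.append(n[j])
--                 end_time = n[j][1]
--         if len(temp_job_list) > len(job_list):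
--             job_list = temp_job_list
--
--     return job_list
-- ===== SOURCE B (Python) =====
-- def longest_job(n):
--     """
--     longest_job: Find the longest sequence of non overlapping jobs
--     :param n: (List(Tuples)) - Contains the start and end time of jobs
--     :return: (List(Tuples)) - Contains the longest job sequence
--     """
--     m = len(n)
--     if m == 0:
--         return []
--
--     def first_fit(j, e):
--         # first position at or after j holding a job that starts at or after e
--         while j < m and n[j][0] < e:
--             j += 1
--         return j
--
--     # Once the greedy takes the job at position k, its continuation is fully
--     # determined: nxt[k] is the position of the next pick, length[k] the number
--     # of jobs taken from k onward.  Tabulate both right-to-left.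
--     nxt = [0] * m
--     length = [0] * (m + 1)          # length[m] = 0: nothing left to take
--     for k in range(m - 1, -1, -1):
--         nxt[k] = first_fit(k + 1, n[k][1])
--         length[k] = 1 + length[nxt[k]]
--
--     # A chain seeded at i is n[i] followed by the greedy pass over the suffix
--     # n[i:] with end time n[i][1]; keep the first seed of maximal total length.
--     best_i, best_len = 0, 0
--     for i in range(m):
--         t = 1 + length[first_fit(i, n[i][1])]
--         if t > best_len:
--             best_i, best_len = i, t
--
--     # Reconstruct only the winning chain by following the pointers.
--     chain = [n[best_i]]
--     j = first_fit(best_i, n[best_i][1])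
--     while j < m:
--         chain.append(n[j])
--         j = nxt[j]
--     return chain
-- ===== Notes on version B (the rewrite author's own statement) =====
-- stated objective: faster
-- what changed: Instead of rebuilding a full greedy chain from every start index (quadratic list building), B tabulates the deterministic greedy continuation once right-to-left (next-pick position and chain length per job), scores each seed with one first-fit scan plus a table lookup, and reconstructs only the winning chain by following the pointers.
import Mathlib
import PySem

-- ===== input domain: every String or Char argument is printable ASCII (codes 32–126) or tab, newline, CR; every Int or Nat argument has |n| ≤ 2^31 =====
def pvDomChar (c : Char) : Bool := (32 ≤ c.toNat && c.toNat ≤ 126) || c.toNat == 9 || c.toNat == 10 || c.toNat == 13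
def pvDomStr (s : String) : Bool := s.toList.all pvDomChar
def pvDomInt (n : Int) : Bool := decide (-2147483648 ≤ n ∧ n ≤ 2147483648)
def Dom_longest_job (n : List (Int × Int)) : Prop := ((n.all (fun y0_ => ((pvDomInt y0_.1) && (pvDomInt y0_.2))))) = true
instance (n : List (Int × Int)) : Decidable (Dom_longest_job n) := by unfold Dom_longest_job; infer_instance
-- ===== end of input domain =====

-- B tabulates the deterministic greedy continuation (next-pick position and
-- chain length per job) once right-to-left and reconstructs only the winning
-- chain, instead of A's rebuilding a full greedy chain list from every seed
-- (objective: faster, measured on generated inputs).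

-- ===== PORT A =====
-- literal transliteration of Source A; n[i]/n[j] accesses are always in range
-- (indices come from range(len(n))), so pyGetD with a junk default is exact.
def longest_job (n : List (Int × Int)) : List (Int × Int) :=
  (PySem.List.pyRange 0 n.length 1).foldl (fun job_list i =>
    let ni := PySem.List.pyGetD n i (0, 0)
    let st := (PySem.List.pyRange i n.length 1).foldl
      (fun (s : List (Int × Int) × Int) j =>
        let nj := PySem.List.pyGetD n j (0, 0)
        if nj.1 ≥ s.2 then (s.1 ++ [nj], nj.2) else s)
      ([ni], ni.2)
    if st.1.length > job_list.length then st.1 else job_list) []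

-- ===== PORT B =====
-- B-side helpers: Source B's `first_fit` while-loop gets an explicit fuel bound
-- (the scan index strictly increases and is bounded by the list length), and
-- Source B's right-to-left tables nxt[]/length[] — each entry depending only on
-- entries at strictly larger indices — are expressed as the recurrences they
-- fill (same values, same scans), again with fuel as the totality guard.

-- Source B's `first_fit(j, e)`: first position ≥ j whose job starts at or after e
def firstFit (n : List (Int × Int)) (e : Int) : Nat → Nat → Nat
  | j, 0 => j
  | j, fuel + 1 =>
    if j < n.length then
      if (n.getD j (0, 0)).1 < e then firstFit n e (j + 1) fuel else j
    else j

-- Source B's table length[k] = 1 + length[nxt[k]], length[m] = 0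
def lenTab (n : List (Int × Int)) : Nat → Nat → Nat
  | _, 0 => 0
  | k, fuel + 1 =>
    if k < n.length then
      1 + lenTab n (firstFit n (n.getD k (0, 0)).2 (k + 1) (n.length - (k + 1))) fuel
    else 0

-- Source B's reconstruction loop: while j < m: append n[j]; j = nxt[j]
def chainFrom (n : List (Int × Int)) : Nat → Nat → List (Int × Int)
  | _, 0 => []
  | j, fuel + 1 =>
    if j < n.length then
      n.getD j (0, 0) ::
        chainFrom n (firstFit n (n.getD j (0, 0)).2 (j + 1) (n.length - (j + 1))) fuel
    else []

def longest_job_alt (n : List (Int × Int)) : List (Int × Int) :=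
  if n.length = 0 then []
  else
    -- best = (best_i, best_len): scan i in range(m) keeping the first strict max
    let best := (PySem.List.pyRange 0 n.length 1).foldl
      (fun (b : Nat × Nat) i =>
        let ni := PySem.List.pyGetD n i (0, 0)
        let t := 1 + lenTab n (firstFit n ni.2 i.toNat (n.length - i.toNat)) n.length
        if t > b.2 then (i.toNat, t) else b) (0, 0)
    let nb := n.getD best.1 (0, 0)
    nb :: chainFrom n (firstFit n nb.2 best.1 (n.length - best.1)) n.length

-- ===== PRECONDITION & SPEC =====
def Spec_longest_job (n : List (Int × Int)) (out : List (Int × Int)) : Prop := out = longest_job_alt n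
instance (n : List (Int × Int)) (out : List (Int × Int)) : Decidable (Spec_longest_job n out) := by unfold Spec_longest_job; infer_instance

-- ===== CLAIM (what is proved, stated in full; the proofs are below) =====
def Claim_equal_longest_job : Prop := ∀ (n : List (Int × Int)), Dom_longest_job n → Spec_longest_job n (longest_job n)

-- ===== LEMMAS AND PROOFS =====

-- A's inner greedy pass from index j with current end_time e (specification form)
def gA (n : List (Int × Int)) : Nat → Nat → Int → List (Int × Int)
  | 0, _, _ => []
  | fuel + 1, j, e =>
    if j < n.length then
      let x := n.getD j (0, 0)
      if x.1 ≥ e then x :: gA n fuel (j + 1) x.2 else gA n fuel (j + 1) e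
    else []

-- the full chain A builds when starting at index i
def tchain (n : List (Int × Int)) (i : Nat) : List (Int × Int) :=
  n.getD i (0, 0) :: gA n (n.length - i) i (n.getD i (0, 0)).2

theorem inner_fold_eq_gA (n : List (Int × Int)) :
    ∀ (fuel j : Nat), n.length - j = fuel → ∀ (acc : List (Int × Int)) (e : Int),
      ((PySem.List.pyRange (j : Int) n.length 1).foldl
        (fun (s : List (Int × Int) × Int) k =>
          let nk := PySem.List.pyGetD n k (0, 0)
          if nk.1 ≥ s.2 then (s.1 ++ [nk], nk.2) else s) (acc, e)).1
      = acc ++ gA n fuel j e := by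
  intro fuel
  induction fuel with
  | zero =>
    intro j hfu acc e
    rw [PySem.List.pyRange_one_eq_nil (by exact_mod_cast (by omega : n.length ≤ j))]
    rw [gA]
    simp
  | succ f ih =>
    intro j hfu acc e
    have hj : j < n.length := by omega
    rw [PySem.List.pyRange_one_cons (by exact_mod_cast hj)]
    simp only [List.foldl_cons, PySem.List.pyGetD_natCast]
    rw [gA, if_pos hj]
    have hcast : ((j : Int) + 1) = ((j + 1 : Nat) : Int) := by push_cast; ring
    by_cases hge : (n.getD j (0, 0)).1 ≥ e
    · rw [if_pos hge, if_pos hge, hcast, ih (j + 1) (by omega)]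
      simp
    · rw [if_neg hge, if_neg hge, hcast, ih (j + 1) (by omega)]

theorem firstFit_ge (n : List (Int × Int)) (e : Int) :
    ∀ (fuel j : Nat), j ≤ firstFit n e j fuel := by
  intro fuel
  induction fuel with
  | zero => intro j; rw [firstFit]
  | succ f ih =>
    intro j
    rw [firstFit]
    split_ifs with h1 h2
    · have := ih (j + 1); omega
    · omega
    · omega

theorem gA_firstFit (n : List (Int × Int)) :
    ∀ (fuel j : Nat) (e : Int), n.length - j = fuel →
      gA n fuel j e =
        (if firstFit n e j fuel < n.length then
          n.getD (firstFit n e j fuel) (0, 0) ::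
            gA n (n.length - (firstFit n e j fuel + 1)) (firstFit n e j fuel + 1)
              (n.getD (firstFit n e j fuel) (0, 0)).2
        else []) := by
  intro fuel
  induction fuel with
  | zero =>
    intro j e hfu
    rw [gA, firstFit, if_neg (by omega)]
  | succ f ih =>
    intro j e hfu
    have hj : j < n.length := by omega
    rw [gA, if_pos hj, firstFit, if_pos hj]
    by_cases hlt : (n.getD j (0, 0)).1 < e
    · rw [if_neg (by omega), if_pos hlt, ih (j + 1) e (by omega)]
    · rw [if_pos (by omega), if_neg hlt, if_pos hj]
      have hf : f = n.length - (j + 1) := by omega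
      rw [hf]

theorem chainFrom_eq (n : List (Int × Int)) :
    ∀ (fuel j : Nat), n.length - j ≤ fuel →
      chainFrom n j fuel =
        (if j < n.length then
          n.getD j (0, 0) :: gA n (n.length - (j + 1)) (j + 1) (n.getD j (0, 0)).2
        else []) := by
  intro fuel
  induction fuel with
  | zero =>
    intro j hj
    rw [chainFrom, if_neg (by omega)]
  | succ f ih =>
    intro j hj
    rw [chainFrom]
    by_cases hjm : j < n.length
    · rw [if_pos hjm, if_pos hjm]
      set f' := firstFit n (n.getD j (0, 0)).2 (j + 1) (n.length - (j + 1)) with hf'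
      have hge : j + 1 ≤ f' := firstFit_ge n _ _ _
      rw [ih f' (by omega)]
      rw [gA_firstFit n (n.length - (j + 1)) (j + 1) (n.getD j (0, 0)).2 rfl, ← hf']
    · rw [if_neg hjm, if_neg hjm]

theorem lenTab_eq (n : List (Int × Int)) :
    ∀ (fuel k : Nat), lenTab n k fuel = (chainFrom n k fuel).length := by
  intro fuel
  induction fuel with
  | zero => intro k; rw [lenTab, chainFrom]; rfl
  | succ f ih =>
    intro k
    rw [lenTab, chainFrom]
    by_cases hk : k < n.length
    · rw [if_pos hk, if_pos hk, List.length_cons, ih]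
      omega
    · rw [if_neg hk, if_neg hk]
      rfl

theorem tchain_eq_alt (n : List (Int × Int)) (i : Nat) :
    tchain n i = n.getD i (0, 0) ::
      chainFrom n (firstFit n (n.getD i (0, 0)).2 i (n.length - i)) n.length := by
  unfold tchain
  set f := firstFit n (n.getD i (0, 0)).2 i (n.length - i) with hf
  rw [gA_firstFit n (n.length - i) i (n.getD i (0, 0)).2 rfl, ← hf]
  rw [chainFrom_eq n n.length f (by omega)]

theorem tchain_len (n : List (Int × Int)) (i : Nat) :
    (tchain n i).length
      = 1 + lenTab n (firstFit n (n.getD i (0, 0)).2 i (n.length - i)) n.length := by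
  rw [tchain_eq_alt n i, lenTab_eq]
  simp only [List.length_cons]
  omega

-- simplified step functions after the per-index rewriting
def stepA (n : List (Int × Int)) (acc : List (Int × Int)) (i : Int) : List (Int × Int) :=
  if (tchain n i.toNat).length > acc.length then tchain n i.toNat else acc

def stepB (n : List (Int × Int)) (b : Nat × Nat) (i : Int) : Nat × Nat :=
  if (tchain n i.toNat).length > b.2 then (i.toNat, (tchain n i.toNat).length) else b

theorem par_fold (n : List (Int × Int)) (j : Nat) :
    ∀ (acc : List (Int × Int)) (b : Nat × Nat),
      acc.length = b.2 →
      acc = (if b.2 = 0 then [] else tchain n b.1) →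
      (PySem.List.pyRange (j : Int) n.length 1).foldl (stepA n) acc
        = (fun r => if r.2 = 0 then [] else tchain n r.1)
            ((PySem.List.pyRange (j : Int) n.length 1).foldl (stepB n) b) := by
  have main : ∀ (fuel j : Nat), n.length - j = fuel →
      ∀ (acc : List (Int × Int)) (b : Nat × Nat),
      acc.length = b.2 →
      acc = (if b.2 = 0 then [] else tchain n b.1) →
      (PySem.List.pyRange (j : Int) n.length 1).foldl (stepA n) acc
        = (fun r => if r.2 = 0 then [] else tchain n r.1)
            ((PySem.List.pyRange (j : Int) n.length 1).foldl (stepB n) b) := by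
    intro fuel
    induction fuel with
    | zero =>
      intro j hfu acc b hlen hrep
      rw [PySem.List.pyRange_one_eq_nil (by exact_mod_cast (by omega : n.length ≤ j))]
      simpa using hrep
    | succ f ih =>
      intro j hfu acc b hlen hrep
      have hj : j < n.length := by omega
      rw [PySem.List.pyRange_one_cons (by exact_mod_cast hj)]
      simp only [List.foldl_cons]
      have hcast : ((j : Int) + 1) = ((j + 1 : Nat) : Int) := by push_cast; ring
      rw [hcast]
      by_cases hgt : (tchain n (j : Int).toNat).length > b.2
      · rw [show stepA n acc (j : Int) = tchain n (j : Int).toNat by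
          unfold stepA; rw [if_pos (by omega)]]
        rw [show stepB n b (j : Int) = ((j : Int).toNat, (tchain n (j : Int).toNat).length) by
          unfold stepB; rw [if_pos hgt]]
        refine ih (j + 1) (by omega) _ _ rfl ?_
        rw [if_neg (by simp [tchain])]
      · rw [show stepA n acc (j : Int) = acc by
          unfold stepA; rw [if_neg (by omega)]]
        rw [show stepB n b (j : Int) = b by unfold stepB; rw [if_neg hgt]]
        exact ih (j + 1) (by omega) _ _ hlen hrep
  exact main (n.length - j) j rfl

theorem foldB_mono (n : List (Int × Int)) (l : List Int) (b : Nat × Nat) :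
    b.2 ≤ (l.foldl (stepB n) b).2 := by
  induction l generalizing b with
  | nil => simp
  | cons x xs ih =>
    refine le_trans ?_ (ih (stepB n b x))
    unfold stepB; split <;> simp <;> omega

theorem stepA_congr (n : List (Int × Int)) (acc : List (Int × Int)) (i : Int)
    (hi : i ∈ PySem.List.pyRange 0 n.length 1) :
    (let ni := PySem.List.pyGetD n i (0, 0)
     let st := (PySem.List.pyRange i n.length 1).foldl
       (fun (s : List (Int × Int) × Int) j =>
         let nj := PySem.List.pyGetD n j (0, 0)
         if nj.1 ≥ s.2 then (s.1 ++ [nj], nj.2) else s)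
       ([ni], ni.2)
     if st.1.length > acc.length then st.1 else acc) = stepA n acc i := by
  rw [PySem.List.mem_pyRange_one] at hi
  have hcast : i = ((i.toNat : Nat) : Int) := by omega
  simp only []
  rw [hcast, PySem.List.pyGetD_natCast,
    inner_fold_eq_gA n (n.length - i.toNat) i.toNat (by rfl)]
  unfold stepA tchain
  simp only [Int.toNat_natCast]
  rfl

theorem stepB_congr (n : List (Int × Int)) (b : Nat × Nat) (i : Int)
    (hi : i ∈ PySem.List.pyRange 0 n.length 1) :
    (let ni := PySem.List.pyGetD n i (0, 0)
     let t := 1 + lenTab n (firstFit n ni.2 i.toNat (n.length - i.toNat)) n.length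
     if t > b.2 then (i.toNat, t) else b) = stepB n b i := by
  rw [PySem.List.mem_pyRange_one] at hi
  have hcast : i = ((i.toNat : Nat) : Int) := by omega
  simp only []
  rw [hcast, PySem.List.pyGetD_natCast]
  simp only [Int.toNat_natCast]
  rw [← tchain_len n i.toNat]
  rfl

theorem foldA_eq (n : List (Int × Int)) :
    longest_job n = List.foldl (stepA n) [] (PySem.List.pyRange 0 (n.length : Int) 1) := by
  unfold longest_job
  exact PySem.List.foldl_congr_mem _ _ _ _ (fun acc i hi => stepA_congr n acc i hi)

theorem foldB_eq (n : List (Int × Int)) :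
    List.foldl
      (fun (b : Nat × Nat) i =>
        let ni := PySem.List.pyGetD n i (0, 0)
        let t := 1 + lenTab n (firstFit n ni.2 i.toNat (n.length - i.toNat)) n.length
        if t > b.2 then (i.toNat, t) else b) (0, 0)
      (PySem.List.pyRange 0 (n.length : Int) 1)
    = List.foldl (stepB n) (0, 0) (PySem.List.pyRange 0 (n.length : Int) 1) :=
  PySem.List.foldl_congr_mem _ _ _ _ (fun b i hi => stepB_congr n b i hi)

theorem alt_eq (n : List (Int × Int)) (hm : n.length ≠ 0) :
    longest_job_alt n =
      (fun r => n.getD r.1 (0, 0) ::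
          chainFrom n (firstFit n (n.getD r.1 (0, 0)).2 r.1 (n.length - r.1)) n.length)
      (List.foldl (stepB n) (0, 0) (PySem.List.pyRange 0 (n.length : Int) 1)) := by
  unfold longest_job_alt
  rw [if_neg hm, foldB_eq n]

theorem longest_job_spec_aux (n : List (Int × Int)) :
    longest_job n = longest_job_alt n := by
  by_cases hm : n.length = 0
  · unfold longest_job longest_job_alt
    rw [if_pos hm, hm]
    simp [PySem.List.pyRange_one_eq_nil]
  · rw [foldA_eq, alt_eq n hm]
    have h0 : ((0 : Nat) : Int) = (0 : Int) := by norm_num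
    have hpar := par_fold n 0 [] (0, 0) rfl (by simp)
    rw [h0] at hpar
    rw [hpar]
    set r := List.foldl (stepB n) (0, 0) (PySem.List.pyRange 0 (n.length : Int) 1) with hr
    have hr2 : r.2 ≠ 0 := by
      have hcons : PySem.List.pyRange 0 (n.length : Int) 1
          = 0 :: PySem.List.pyRange 1 (n.length : Int) 1 :=
        PySem.List.pyRange_one_cons (by exact_mod_cast Nat.pos_of_ne_zero hm)
      rw [hr, hcons]
      simp only [List.foldl_cons]
      have h1 : stepB n (0, 0) 0 = ((0 : Int).toNat, (tchain n (0 : Int).toNat).length) := by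
        unfold stepB
        rw [if_pos (by simp [tchain])]
      rw [h1]
      have hmono := foldB_mono n (PySem.List.pyRange 1 (n.length : Int) 1)
        ((0 : Int).toNat, (tchain n (0 : Int).toNat).length)
      simp only [tchain, List.length_cons] at hmono ⊢
      omega
    simp only [if_neg hr2]
    rw [tchain_eq_alt n r.1]

-- ===== VERDICT (by name: the statement is the Claim_ definition above) =====
theorem longest_job_spec : Claim_equal_longest_job := by
  intro n _
  unfold Spec_longest_job
  exact longest_job_spec_aux n
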